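-- pv_equiv track=rewrite | github.com/Limess/ProjectEuler | Project_Euler_120.py | not_fail_method
-- ===== SOURCE A (Python) =====
-- def not_fail_method(max_a):
--     a=3
--     sum_r_max=0
--     while a<=max_a:
--         if a%2==0:
--             sum_r_max+=a*(a-2)
--         elif a%2!=0:
--             sum_r_max+=a*(a-1)
--         a+=1
--     return sum_r_max
-- ===== SOURCE B (Python) =====
-- def not_fail_method(max_a):
--     if max_a < 3:
--         return 0
--     n = max_a
--     # sum_{a=3..n} a^2 - 2*sum_{a=3..n} a + sum of odd a in 3..n, in closed form
--     return n * (n + 1) * (2 * n + 1) // 6 - n * (n + 1) + ((n + 1) // 2) ** 2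
-- ===== Notes on version B (the rewrite author's own statement) =====
-- stated objective: faster
-- what changed: Replaced the O(max_a) accumulation loop by a closed-form arithmetic expression (sum of squares minus linear sums, split by parity via (n+1)//2).
import Mathlib
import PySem

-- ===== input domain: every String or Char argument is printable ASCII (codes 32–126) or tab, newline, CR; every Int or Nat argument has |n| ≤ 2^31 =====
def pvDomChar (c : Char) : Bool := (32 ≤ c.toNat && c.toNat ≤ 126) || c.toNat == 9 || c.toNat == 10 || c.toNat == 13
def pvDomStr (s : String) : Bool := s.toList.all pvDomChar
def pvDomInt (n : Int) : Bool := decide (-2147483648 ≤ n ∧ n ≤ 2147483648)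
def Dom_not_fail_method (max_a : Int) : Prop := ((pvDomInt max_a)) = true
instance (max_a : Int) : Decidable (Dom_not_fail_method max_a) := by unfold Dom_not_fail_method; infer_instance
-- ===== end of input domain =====

-- B replaces A's O(max_a) accumulation loop by a closed-form arithmetic expression (objective: faster, asymptotic).

-- ===== PORT A =====
-- the while loop, as structural recursion on the remaining iteration count
def notFailLoop (max_a : Int) (a sum_r_max : Int) : Nat → Int
  | 0 => sum_r_max
  | fuel + 1 =>
    if a ≤ max_a then
      notFailLoop max_a (a + 1)
        (if PySem.Int.mod a 2 = 0 then sum_r_max + a * (a - 2)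
         else if PySem.Int.mod a 2 ≠ 0 then sum_r_max + a * (a - 1)
         else sum_r_max) fuel
    else sum_r_max

def not_fail_method (max_a : Int) : Int :=
  notFailLoop max_a 3 0 (max_a - 2).toNat

-- ===== PORT B =====
def not_fail_method_alt (max_a : Int) : Int :=
  if max_a < 3 then 0
  else
    PySem.Int.floordiv (max_a * (max_a + 1) * (2 * max_a + 1)) 6
      - max_a * (max_a + 1)
      + (PySem.Int.floordiv (max_a + 1) 2) ^ 2

-- ===== PRECONDITION & SPEC =====
def Spec_not_fail_method (max_a : Int) (out : Int) : Prop := out = not_fail_method_alt max_a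
instance (max_a : Int) (out : Int) : Decidable (Spec_not_fail_method max_a out) := by unfold Spec_not_fail_method; infer_instance

-- ===== CLAIM (what is proved, stated in full; the proofs are below) =====
def Claim_equal_not_fail_method : Prop := ∀ (max_a : Int), Dom_not_fail_method max_a → Spec_not_fail_method max_a (not_fail_method max_a)

-- ===== LEMMAS AND PROOFS =====

-- closed form of the partial sum up to x (in ediv form)
def Tsum (x : Int) : Int := x*(x+1)*(2*x+1)/6 - x*(x+1) + ((x+1)/2)^2


lemma Tsum_0 (j : Int) : Tsum (6*j) = ((1)*j + (18)*j^2 + (72)*j^3) - (6*j)*((6*j)+1) + (0+3*j)^2 := by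
  unfold Tsum
  rw [show (6*j)*((6*j)+1)*(2*(6*j)+1) = 6*((1)*j + (18)*j^2 + (72)*j^3) from by ring,
      Int.mul_ediv_cancel_left _ (by norm_num),
      show ((6*j)+1)/2 = 0+3*j from by omega]

lemma Tsum_1 (j : Int) : Tsum (6*j+1) = ((1) + (13)*j + (54)*j^2 + (72)*j^3) - (6*j+1)*((6*j+1)+1) + (1+3*j)^2 := by
  unfold Tsum
  rw [show (6*j+1)*((6*j+1)+1)*(2*(6*j+1)+1) = 6*((1) + (13)*j + (54)*j^2 + (72)*j^3) from by ring,
      Int.mul_ediv_cancel_left _ (by norm_num),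
      show ((6*j+1)+1)/2 = 1+3*j from by omega]

lemma Tsum_2 (j : Int) : Tsum (6*j+2) = ((5) + (37)*j + (90)*j^2 + (72)*j^3) - (6*j+2)*((6*j+2)+1) + (1+3*j)^2 := by
  unfold Tsum
  rw [show (6*j+2)*((6*j+2)+1)*(2*(6*j+2)+1) = 6*((5) + (37)*j + (90)*j^2 + (72)*j^3) from by ring,
      Int.mul_ediv_cancel_left _ (by norm_num),
      show ((6*j+2)+1)/2 = 1+3*j from by omega]

lemma Tsum_3 (j : Int) : Tsum (6*j+3) = ((14) + (73)*j + (126)*j^2 + (72)*j^3) - (6*j+3)*((6*j+3)+1) + (2+3*j)^2 := by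
  unfold Tsum
  rw [show (6*j+3)*((6*j+3)+1)*(2*(6*j+3)+1) = 6*((14) + (73)*j + (126)*j^2 + (72)*j^3) from by ring,
      Int.mul_ediv_cancel_left _ (by norm_num),
      show ((6*j+3)+1)/2 = 2+3*j from by omega]

lemma Tsum_4 (j : Int) : Tsum (6*j+4) = ((30) + (121)*j + (162)*j^2 + (72)*j^3) - (6*j+4)*((6*j+4)+1) + (2+3*j)^2 := by
  unfold Tsum
  rw [show (6*j+4)*((6*j+4)+1)*(2*(6*j+4)+1) = 6*((30) + (121)*j + (162)*j^2 + (72)*j^3) from by ring,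
      Int.mul_ediv_cancel_left _ (by norm_num),
      show ((6*j+4)+1)/2 = 2+3*j from by omega]

lemma Tsum_5 (j : Int) : Tsum (6*j+5) = ((55) + (181)*j + (198)*j^2 + (72)*j^3) - (6*j+5)*((6*j+5)+1) + (3+3*j)^2 := by
  unfold Tsum
  rw [show (6*j+5)*((6*j+5)+1)*(2*(6*j+5)+1) = 6*((55) + (181)*j + (198)*j^2 + (72)*j^3) from by ring,
      Int.mul_ediv_cancel_left _ (by norm_num),
      show ((6*j+5)+1)/2 = 3+3*j from by omega]


lemma Tsum_step (a : Int) :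
    (if PySem.Int.mod a 2 = 0 then a * (a - 2) else a * (a - 1)) = Tsum a - Tsum (a - 1) := by
  have hmod : PySem.Int.mod a 2 = a % 2 := PySem.Int.mod_eq_emod_of_pos (by norm_num)
  obtain ⟨j, hj⟩ : ∃ j, a = 6*j ∨ a = 6*j+1 ∨ a = 6*j+2 ∨ a = 6*j+3 ∨ a = 6*j+4 ∨ a = 6*j+5 :=
    ⟨a / 6, by omega⟩
  rcases hj with h | h | h | h | h | h
  · subst h
    rw [hmod, show (6*j) % 2 = 0 from by omega, if_pos rfl,
        show 6*j - 1 = 6*(j-1)+5 from by ring, Tsum_0 j, Tsum_5 (j-1)]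
    ring
  · subst h
    rw [hmod, show (6*j+1) % 2 = 1 from by omega, if_neg (by norm_num),
        show 6*j+1 - 1 = 6*j from by ring, Tsum_1 j, Tsum_0 j]
    ring
  · subst h
    rw [hmod, show (6*j+2) % 2 = 0 from by omega, if_pos rfl,
        show 6*j+2 - 1 = 6*j+1 from by ring, Tsum_2 j, Tsum_1 j]
    ring
  · subst h
    rw [hmod, show (6*j+3) % 2 = 1 from by omega, if_neg (by norm_num),
        show 6*j+3 - 1 = 6*j+2 from by ring, Tsum_3 j, Tsum_2 j]
    ring
  · subst h
    rw [hmod, show (6*j+4) % 2 = 0 from by omega, if_pos rfl,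
        show 6*j+4 - 1 = 6*j+3 from by ring, Tsum_4 j, Tsum_3 j]
    ring
  · subst h
    rw [hmod, show (6*j+5) % 2 = 1 from by omega, if_neg (by norm_num),
        show 6*j+5 - 1 = 6*j+4 from by ring, Tsum_5 j, Tsum_4 j]
    ring

lemma notFailLoop_eq (max_a : Int) :
    ∀ (fuel : Nat) (a s : Int), a = max_a + 1 - fuel →
      notFailLoop max_a a s fuel = s + (Tsum max_a - Tsum (a - 1)) := by
  intro fuel
  induction fuel with
  | zero =>
    intro a s ha
    simp only [notFailLoop]
    have : a - 1 = max_a := by push_cast at ha; omega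
    rw [this]; ring
  | succ f ih =>
    intro a s ha
    have hle : a ≤ max_a := by push_cast at ha ⊢; omega
    simp only [notFailLoop, if_pos hle]
    have hbody :
        (if PySem.Int.mod a 2 = 0 then s + a * (a - 2)
         else if PySem.Int.mod a 2 ≠ 0 then s + a * (a - 1) else s)
          = s + (Tsum a - Tsum (a - 1)) := by
      rw [← Tsum_step a]
      by_cases h : PySem.Int.mod a 2 = 0
      · rw [if_pos h, if_pos h]
      · rw [if_neg h, if_neg h, if_pos h]
    rw [hbody, ih (a + 1) _ (by push_cast at ha ⊢; omega)]
    have : a + 1 - 1 = a := by ring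
    rw [this]; ring

lemma Tsum_two : Tsum 2 = 0 := by decide

-- ===== VERDICT (by name: the statement is the Claim_ definition above) =====
theorem not_fail_method_spec : Claim_equal_not_fail_method := by
  intro max_a _
  unfold Spec_not_fail_method not_fail_method not_fail_method_alt
  by_cases h : max_a < 3
  · have hf : (max_a - 2).toNat = 0 := by omega
    rw [hf, if_pos h]
    rfl
  · rw [not_lt] at h
    have hf : ((max_a - 2).toNat : Int) = max_a - 2 := by omega
    rw [notFailLoop_eq max_a _ 3 0 (by rw [hf]; ring), if_neg (by omega)]
    rw [show (3:Int) - 1 = 2 from by norm_num, Tsum_two,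
        PySem.Int.floordiv_eq_ediv_of_pos (by norm_num),
        PySem.Int.floordiv_eq_ediv_of_pos (by norm_num)]
    unfold Tsum
    ring
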